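-- pv_equiv track=rewrite | github.com/alexandraback/datacollection | solutions_5765824346324992_1/Python/paimon/b.py | solve
-- ===== SOURCE A (Python) =====
-- def f(t, m):
--     return sum(t//x for x in m) + len(m)
--
-- def f_inv(n, m, begin=None, end=None):
--     if begin is None: begin = 0
--     if end is None: end = 100000*n
--     if begin == end:
--         return begin
--     t = (begin + end)//2;
--     v = f(t, m)
--     if v < n:
--         return f_inv(n, m, t + 1, end)
--     return f_inv(n, m, begin, t)
--
-- def solve(n, m):
--     t = f_inv(n, m)
--     v = f(t, m)
--     for i, mi in enumerate(reversed(m)):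
--         if t%mi == 0:
--             if v == n:
--                 return len(m) - i
--             v -= 1
-- ===== SOURCE B (Python) =====
-- def solve(n, m):
--     # iterative binary search over [begin, end)
--     begin, end = 0, 100000 * n
--     while begin != end:
--         t = (begin + end) // 2
--         if sum(t // x + 1 for x in m) < n:
--             begin = t + 1
--         else:
--             end = t
--     t = begin
--     idxs = [j for j, x in enumerate(m) if t % x == 0]
--     k = sum(t // x + 1 for x in m) - n
--     if 0 <= k < len(idxs):
--         return idxs[len(idxs) - 1 - k] + 1
--     return None
-- ===== Notes on version B (the rewrite author's own statement) =====
-- stated objective: alternative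
-- what changed: The recursive binary search becomes an explicit iterative loop, and the reversed-scan that decrements a running counter v until it hits n is replaced by a forward pass that collects the divisor positions once and picks the answer by index arithmetic (offset k = f(t,m)-n from the end).
import Mathlib
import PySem

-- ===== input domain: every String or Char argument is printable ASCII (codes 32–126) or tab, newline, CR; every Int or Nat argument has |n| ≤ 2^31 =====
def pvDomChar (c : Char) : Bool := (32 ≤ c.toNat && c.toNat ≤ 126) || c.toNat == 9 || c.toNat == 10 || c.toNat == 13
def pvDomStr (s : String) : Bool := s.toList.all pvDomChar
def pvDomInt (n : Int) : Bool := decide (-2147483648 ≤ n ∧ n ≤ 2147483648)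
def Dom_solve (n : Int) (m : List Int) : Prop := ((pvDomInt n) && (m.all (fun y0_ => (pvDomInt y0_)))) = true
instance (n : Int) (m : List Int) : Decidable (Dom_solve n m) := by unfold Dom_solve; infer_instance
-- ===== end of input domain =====

-- B replaces A's recursive binary search by an iterative loop and A's reversed decrementing
-- scan by one forward collection of divisor positions plus index arithmetic (objective: alternative).

-- ===== PORT A =====

-- f(t, m) = sum(t//x for x in m) + len(m)
def fA (t : Int) (m : List Int) : Int :=
  (m.map (fun x => PySem.Int.floordiv t x)).sum + m.length

-- midpoint facts used only for termination of the port
theorem pvMid_ge (b e : Int) (h : b ≤ e) : b ≤ PySem.Int.floordiv (b + e) 2 :=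
  (PySem.Int.floordiv_two_mid_bounds h).1

theorem pvMid_lt (b e : Int) (h : b < e) : PySem.Int.floordiv (b + e) 2 < e := by
  rw [PySem.Int.floordiv_lt_iff_lt_mul (by omega)]; omega

-- f_inv(n, m, begin, end); the Python recursion diverges when begin > end (only reachable
-- for n < 0, excluded by Pre_), so that unreachable branch returns b as a totality guard.
def finvA (n : Int) (m : List Int) (b e : Int) : Int :=
  if b = e then b
  else if hlt : b < e then
    let t := PySem.Int.floordiv (b + e) 2
    if fA t m < n then finvA n m (t + 1) e else finvA n m b t
  else b
termination_by (e - b).toNat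
decreasing_by
  · have h1 := pvMid_ge b e (le_of_lt hlt)
    have h2 := pvMid_lt b e hlt
    omega
  · have h1 := pvMid_ge b e (le_of_lt hlt)
    have h2 := pvMid_lt b e hlt
    omega

-- the 'for i, mi in enumerate(reversed(m))' loop of solve
def scanA (t n len0 : Int) : List Int → Int → Int → Option Int
  | [], _, _ => none
  | mi :: rest, i, v =>
    if PySem.Int.mod t mi = 0 then
      if v = n then some (len0 - i) else scanA t n len0 rest (i + 1) (v - 1)
    else scanA t n len0 rest (i + 1) v

def solve (n : Int) (m : List Int) : Option Int :=
  let t := finvA n m 0 (100000 * n)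
  let v := fA t m
  scanA t n (m.length : Int) m.reverse 0 v

-- ===== PORT B =====

-- sum(t // x + 1 for x in m)
def fB (t : Int) (m : List Int) : Int :=
  (m.map (fun x => PySem.Int.floordiv t x + 1)).sum

-- the while-loop 'while begin != end: ...'; under Pre_ the invariant b ≤ e holds, so the
-- loop condition is ported as b < e (totality guard for the unreachable b > e case).
def bloop (n : Int) (m : List Int) (b e : Int) : Int :=
  if hlt : b < e then
    let t := PySem.Int.floordiv (b + e) 2
    if fB t m < n then bloop n m (t + 1) e else bloop n m b t
  else b
termination_by (e - b).toNat
decreasing_by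
  · have h1 := pvMid_ge b e (le_of_lt hlt)
    have h2 := pvMid_lt b e hlt
    omega
  · have h1 := pvMid_ge b e (le_of_lt hlt)
    have h2 := pvMid_lt b e hlt
    omega

def solve_alt (n : Int) (m : List Int) : Option Int :=
  let t := bloop n m 0 (100000 * n)
  let idxs := ((PySem.List.enumerate m).filter (fun p => PySem.Int.mod t p.2 == 0)).map (fun p => p.1)
  let k := fB t m - n
  if 0 ≤ k ∧ k < (idxs.length : Int) then
    (PySem.List.pyGet? idxs ((idxs.length : Int) - 1 - k)).map (· + 1)
  else none

-- ===== PRECONDITION & SPEC =====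
-- Pre_ excludes exactly the inputs where the Python A raises: n < 0 (the recursion
-- f_inv(0, 100000*n) never terminates, RecursionError) and 0 ∈ m (ZeroDivisionError).
def Pre_solve (n : Int) (m : List Int) : Prop := 0 ≤ n ∧ ∀ x ∈ m, x ≠ 0
instance (n : Int) (m : List Int) : Decidable (Pre_solve n m) := by unfold Pre_solve; infer_instance
def pvWitness_solve : Int × List Int := (3, [2, 5])

def Spec_solve (n : Int) (m : List Int) (out : Option Int) : Prop := out = solve_alt n m
instance (n : Int) (m : List Int) (out : Option Int) : Decidable (Spec_solve n m out) := by unfold Spec_solve; infer_instance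

-- ===== CLAIM (what is proved, stated in full; the proofs are below) =====
def Claim_equal_solve : Prop := ∀ (n : Int) (m : List Int), Dom_solve n m → Pre_solve n m → Spec_solve n m (solve n m)

-- ===== LEMMAS AND PROOFS =====

theorem fB_eq_fA (t : Int) (m : List Int) : fB t m = fA t m := by
  unfold fA fB
  induction m with
  | nil => simp
  | cons x xs ih => simp only [List.map_cons, List.sum_cons, List.length_cons, ih]; push_cast; ring

theorem finvA_eq_bloop (n : Int) (m : List Int) :
    ∀ (k : Nat) (b e : Int), (e - b).toNat = k → b ≤ e → finvA n m b e = bloop n m b e := by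
  intro k
  induction k using Nat.strong_induction_on with
  | _ k ih =>
    intro b e hk hle
    rw [finvA, bloop]
    by_cases heq : b = e
    · simp [heq]
    · have hlt : b < e := lt_of_le_of_ne hle heq
      have h1 := pvMid_ge b e hle
      have h2 := pvMid_lt b e hlt
      simp only [heq, if_false, dif_pos hlt, fB_eq_fA]
      split
      · exact ih _ (by omega) _ _ rfl (by omega)
      · exact ih _ (by omega) _ _ rfl (by omega)

-- positions (0-based) of the elements x of the list with t % x == 0
def dpos (t : Int) : List Int → List Nat
  | [] => []
  | x :: xs =>
    if PySem.Int.mod t x = 0 then 0 :: (dpos t xs).map (· + 1) else (dpos t xs).map (· + 1)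

theorem dpos_lt (t : Int) (l : List Int) : ∀ j ∈ dpos t l, j < l.length := by
  induction l with
  | nil => simp [dpos]
  | cons x xs ih =>
    intro j hj
    simp only [dpos] at hj
    simp only [List.length_cons]
    split at hj
    · rcases List.mem_cons.1 hj with rfl | hj
      · omega
      · obtain ⟨a, ha, rfl⟩ := List.mem_map.1 hj
        have := ih a ha; omega
    · obtain ⟨a, ha, rfl⟩ := List.mem_map.1 hj
      have := ih a ha; omega

theorem dpos_append (t : Int) (a b : List Int) :
    dpos t (a ++ b) = dpos t a ++ (dpos t b).map (· + a.length) := by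
  induction a with
  | nil => simp [dpos]
  | cons x xs ih =>
    simp only [List.cons_append, dpos, ih, List.length_cons]
    split <;>
    · simp only [List.map_append, List.map_map, List.cons_append]
      first
      | (congr 2 <;> [skip; (funext j; simp; omega)]) 
      | (congr 1 <;> (try funext j) <;> simp <;> omega)

theorem dpos_reverse (t : Int) (l : List Int) :
    dpos t l.reverse = ((dpos t l).map (fun j => l.length - 1 - j)).reverse := by
  induction l with
  | nil => simp [dpos]
  | cons x xs ih =>
    rw [List.reverse_cons, dpos_append, ih]
    simp only [dpos, List.length_cons, List.length_reverse]
    have hfun : (fun j => xs.length - 1 - j) = ((fun j : Nat => xs.length + 1 - 1 - j) ∘ fun x => x + 1) := by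
      funext j; simp only [Function.comp_apply]; omega
    split <;>
      simp only [List.map_cons, List.map_nil, List.map_map, List.reverse_cons,
        List.map_reverse, List.length_reverse, List.append_nil] <;>
      rw [← hfun] <;> simp

theorem scanA_eq (t n len0 : Int) :
    ∀ (r : List Int) (i v : Int),
      scanA t n len0 r i v =
        if 0 ≤ v - n ∧ v - n < ((dpos t r).length : Int) then
          some (len0 - i - ((dpos t r).getD (v - n).toNat 0 : Nat))
        else none := by
  intro r
  induction r with
  | nil => intro i v; simp [scanA, dpos]
  | cons mi rest ih =>
    intro i v
    simp only [scanA, dpos]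
    by_cases hd : PySem.Int.mod t mi = 0
    · simp only [hd, if_true]
      by_cases hv : v = n
      · subst hv
        rw [if_pos (by simp)]
        simp
      · rw [if_neg hv, ih]
        have hne : v - n ≠ 0 := fun h => hv (by omega)
        by_cases hin : 0 ≤ v - 1 - n ∧ v - 1 - n < ((dpos t rest).length : Int)
        · rw [if_pos hin, if_pos (by simp; omega)]
          have hlen : (v - n).toNat = (v - 1 - n).toNat + 1 := by omega
          rw [hlen, List.getD_cons_succ]
          have hb : (v - 1 - n).toNat < (dpos t rest).length := by omega
          rw [List.getD_eq_getElem _ _ hb,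
            List.getD_eq_getElem ((dpos t rest).map (· + 1)) _ (by simpa using hb),
            List.getElem_map]
          push_cast
          ring_nf
        · rw [if_neg hin, if_neg (by simp; omega)]
    · simp only [hd, if_false]
      rw [ih]
      by_cases hin : 0 ≤ v - n ∧ v - n < ((dpos t rest).length : Int)
      · rw [if_pos hin, if_pos (by simp; omega)]
        have hb : (v - n).toNat < (dpos t rest).length := by omega
        rw [List.getD_eq_getElem _ _ hb,
          List.getD_eq_getElem ((dpos t rest).map (· + 1)) _ (by simpa using hb),
          List.getElem_map]
        push_cast
        ring_nf
      · rw [if_neg hin, if_neg (by simp; omega)]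

theorem filter_enumerate_eq_dpos (t : Int) (l : List Int) :
    ∀ s : Int,
      ((PySem.List.enumerate l s).filter (fun p => PySem.Int.mod t p.2 == 0)).map (fun p => p.1)
        = (dpos t l).map (fun j : Nat => s + (j : Int)) := by
  induction l with
  | nil => intro s; simp [PySem.List.enumerate_nil, dpos]
  | cons x xs ih =>
    intro s
    rw [PySem.List.enumerate_cons]
    simp only [dpos]
    by_cases hd : PySem.Int.mod t x = 0
    · rw [List.filter_cons_of_pos (by simp [hd]), if_pos hd]
      simp only [List.map_cons]
      rw [ih (s + 1), List.map_map]
      congr 1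
      · norm_num
      · congr 1; funext j; simp only [Function.comp_apply]; push_cast; ring
    · rw [List.filter_cons_of_neg (by simp [hd]), if_neg hd, ih (s + 1), List.map_map]
      congr 1; funext j; simp only [Function.comp_apply]; push_cast; ring

-- ===== VERDICT (by name: the statement is the Claim_ definition above) =====
theorem solve_spec : Claim_equal_solve := by
  intro n m _hdom hpre
  obtain ⟨hn, -⟩ := hpre
  unfold Spec_solve solve solve_alt
  dsimp only
  rw [← finvA_eq_bloop n m _ 0 (100000 * n) rfl (by omega)]
  set t := finvA n m 0 (100000 * n) with htdef
  rw [scanA_eq, fB_eq_fA, filter_enumerate_eq_dpos t m 0, dpos_reverse]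
  set k := fA t m - n with hkdef
  by_cases hin : 0 ≤ k ∧ k < (((dpos t m).length : Nat) : Int)
  · rw [if_pos (by simpa using hin), if_pos (by simpa using hin)]
    have hkc : k.toNat < (dpos t m).length := by omega
    have hidx : k.toNat < ((dpos t m).map (fun j => m.length - 1 - j)).reverse.length := by
      simpa using hkc
    rw [List.getD_eq_getElem _ _ hidx, List.getElem_reverse, List.getElem_map]
    have hblen : (((dpos t m).map (fun j : Nat => (0 : Int) + (j : Int))).length : Int)
        = ((dpos t m).length : Int) := by simp
    rw [hblen, PySem.List.pyGet?_of_nonneg _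
      (show (0 : Int) ≤ ((dpos t m).length : Int) - 1 - k by omega)]
    have hbi : (((dpos t m).length : Int) - 1 - k).toNat
        < ((dpos t m).map (fun j : Nat => (0 : Int) + (j : Int))).length := by
      simp; omega
    rw [List.getElem?_eq_getElem hbi, List.getElem_map]
    simp only [Option.map_some, Option.some.injEq]
    have hsame : ((dpos t m).map (fun j => m.length - 1 - j)).length - 1 - k.toNat
        = (((dpos t m).length : Int) - 1 - k).toNat := by simp; omega
    have hb2 : (((dpos t m).length : Int) - 1 - k).toNat < (dpos t m).length := by omega
    have helem := dpos_lt t m ((dpos t m)[(((dpos t m).length : Int) - 1 - k).toNat]'hb2)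
      (List.getElem_mem hb2)
    simp only [hsame]
    push_cast
    omega
  · rw [if_neg (by simpa using hin), if_neg (by simpa using hin)]
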